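-- pv_equiv track=rewrite | github.com/BenNorbom/ANN_Rapid_Predictor_2.0 | graphing/plot_tracts.py | parse_electrode_config
-- ===== SOURCE A (Python) =====
-- def parse_electrode_config(config_str):
--     """Parse an electrode configuration string like '01-23', '+012-3', '-0+1-2+3'.
--
--     Returns a dict mapping contact number (0-3) to polarity:
--         '+' = anode (blue), '-' = cathode (red), None = inactive (grey).
--     """
--     contact_polarity = {0: None, 1: None, 2: None, 3: None}
--     current_sign = None
--     for ch in config_str:
--         if ch in '+-':
--             current_sign = ch
--         elif ch.isdigit():
--             contact_polarity[int(ch)] = current_sign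
--             current_sign = None  # sign consumed — reset
--     return contact_polarity
-- ===== SOURCE B (Python) =====
-- def parse_electrode_config(config_str):
--     """Parse an electrode configuration string like '01-23', '+012-3', '-0+1-2+3'."""
--     tokens = [c for c in config_str if c in ('+', '-') or c.isdigit()]
--     contact_polarity = {0: None, 1: None, 2: None, 3: None}
--     for prev, c in zip([None] + tokens, tokens):
--         if c.isdigit():
--             contact_polarity[int(c)] = prev if prev in ('+', '-') else None
--     return contact_polarity
-- ===== Notes on version B (the rewrite author's own statement) =====
-- stated objective: alternative
-- what changed: Replaces A's single stateful loop with a mutable current_sign register by a stateless two-phase pass: filter the string to sign/digit tokens, then zip each token with its predecessor and read a digit's polarity off that predecessor.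
import Mathlib
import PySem

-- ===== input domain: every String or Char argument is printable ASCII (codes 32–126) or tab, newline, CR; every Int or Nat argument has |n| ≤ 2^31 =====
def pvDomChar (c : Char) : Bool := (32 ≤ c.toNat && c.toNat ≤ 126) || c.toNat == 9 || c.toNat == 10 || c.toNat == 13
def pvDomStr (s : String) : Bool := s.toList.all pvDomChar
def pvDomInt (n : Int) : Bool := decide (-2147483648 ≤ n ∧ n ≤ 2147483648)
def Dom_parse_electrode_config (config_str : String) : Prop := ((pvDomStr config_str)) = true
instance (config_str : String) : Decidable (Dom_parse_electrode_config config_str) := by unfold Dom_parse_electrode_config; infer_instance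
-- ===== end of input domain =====

-- B replaces A's mutable current_sign state machine by a stateless two-phase pass
-- (filter to sign/digit tokens, then pair each token with its predecessor); objective: alternative.

-- ===== PORT A =====
-- one loop step of A: 'if ch in "+-": current_sign = ch; elif ch.isdigit(): d[int(ch)] = current_sign; current_sign = None'
def pecStepA (st : PySem.Dict Int (Option String) × Option String) (ch : Char) :
    PySem.Dict Int (Option String) × Option String :=
  if ch = '+' ∨ ch = '-' then (st.1, some (String.ofList [ch]))      -- ch in '+-' (single ASCII char)
  else if ch.isDigit then (st.1.insert ((ch.toNat : Int) - 48) st.2, none)  -- int(ch) for an ASCII digit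
  else st

def parse_electrode_config (config_str : String) : List (Int × Option String) :=
  let init : PySem.Dict Int (Option String) :=
    PySem.Dict.ofList [(0, none), (1, none), (2, none), (3, none)]
  (config_str.toList.foldl pecStepA (init, none)).1.items

-- ===== PORT B =====
def parse_electrode_config_alt (config_str : String) : List (Int × Option String) :=
  let tokens := config_str.toList.filter (fun c => c == '+' || c == '-' || c.isDigit)
  let init : PySem.Dict Int (Option String) :=
    PySem.Dict.ofList [(0, none), (1, none), (2, none), (3, none)]
  ((List.zip ((none : Option Char) :: tokens.map some) tokens).foldl
    (fun d pc =>
      if pc.2.isDigit then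
        d.insert ((pc.2.toNat : Int) - 48)
          (if pc.1 = some '+' ∨ pc.1 = some '-' then pc.1.map (fun c => String.ofList [c]) else none)
      else d) init).items

-- ===== PRECONDITION & SPEC =====
def Spec_parse_electrode_config (config_str : String) (out : List (Int × Option String)) : Prop := out = parse_electrode_config_alt config_str
instance (config_str : String) (out : List (Int × Option String)) : Decidable (Spec_parse_electrode_config config_str out) := by unfold Spec_parse_electrode_config; infer_instance

-- ===== CLAIM (what is proved, stated in full; the proofs are below) =====
def Claim_equal_parse_electrode_config : Prop := ∀ (config_str : String), Dom_parse_electrode_config config_str → Spec_parse_electrode_config config_str (parse_electrode_config config_str)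

-- ===== LEMMAS AND PROOFS =====

-- A's current_sign as a function of the token last seen by B (its 'prev')
def pecSignVal (p : Option Char) : Option String :=
  if p = some '+' ∨ p = some '-' then p.map (fun c => String.ofList [c]) else none

def pecStepB (d : PySem.Dict Int (Option String)) (pc : Option Char × Char) :
    PySem.Dict Int (Option String) :=
  if pc.2.isDigit then
    d.insert ((pc.2.toNat : Int) - 48)
      (if pc.1 = some '+' ∨ pc.1 = some '-' then pc.1.map (fun c => String.ofList [c]) else none)
  else d

lemma pec_key : ∀ (l : List Char) (d : PySem.Dict Int (Option String)) (p : Option Char),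
    (l.foldl pecStepA (d, pecSignVal p)).1
      = (List.zip (p :: (l.filter (fun c => c == '+' || c == '-' || c.isDigit)).map some)
          (l.filter (fun c => c == '+' || c == '-' || c.isDigit))).foldl pecStepB d := by
  intro l
  induction l with
  | nil => intro d p; simp
  | cons c l ih =>
    intro d p
    by_cases hs : c = '+' ∨ c = '-'
    · have hnd : c.isDigit = false := by rcases hs with h | h <;> subst h <;> decide
      have hf : (fun c => c == '+' || c == '-' || c.isDigit) c = true := by
        rcases hs with h | h <;> subst h <;> decide
      have hsv : some (String.ofList [c]) = pecSignVal (some c) := by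
        simp [pecSignVal, hs]
      simp only [List.foldl_cons, List.filter_cons, hf, if_true, List.map_cons, List.zip_cons_cons]
      rw [show pecStepA (d, pecSignVal p) c = (d, pecSignVal (some c)) by
        simp [pecStepA, hs, ← hsv]]
      rw [ih d (some c)]
      simp [pecStepB, hnd]
    · by_cases hd : c.isDigit
      · have hf : (fun c => c == '+' || c == '-' || c.isDigit) c = true := by
          simp [hd]
        have hsv : pecSignVal (some c) = none := by
          have h1 : c ≠ '+' := by rintro rfl; simp at hd
          have h2 : c ≠ '-' := by rintro rfl; simp at hd
          simp [pecSignVal, h1, h2]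
        simp only [List.foldl_cons, List.filter_cons, hf, if_true, List.map_cons, List.zip_cons_cons]
        rw [show pecStepA (d, pecSignVal p) c
            = (d.insert ((c.toNat : Int) - 48) (pecSignVal p), pecSignVal (some c)) by
          simp [pecStepA, hs, hd, hsv]]
        rw [ih _ (some c)]
        simp [pecStepB, hd, pecSignVal]
      · have hf : (fun c => c == '+' || c == '-' || c.isDigit) c = false := by
          simp only [Bool.or_eq_false_iff, beq_eq_false_iff_ne]
          exact ⟨⟨fun h => hs (Or.inl h), fun h => hs (Or.inr h)⟩, by simpa using hd⟩
        simp only [List.foldl_cons, List.filter_cons, hf]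
        rw [show pecStepA (d, pecSignVal p) c = (d, pecSignVal p) by
          simp [pecStepA, hs, hd]]
        exact ih d p

-- ===== VERDICT (by name: the statement is the Claim_ definition above) =====
theorem parse_electrode_config_spec : Claim_equal_parse_electrode_config := by
  intro s _
  unfold Spec_parse_electrode_config parse_electrode_config parse_electrode_config_alt
  have h := congrArg PySem.Dict.items
    (pec_key s.toList (PySem.Dict.ofList [(0, none), (1, none), (2, none), (3, none)]) none)
  simpa [pecSignVal, pecStepB] using h
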